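-- pv_equiv track=rewrite | github.com/pypi-data/pypi-mirror-361 | packages/ctfatsegment/ctfatsegment-0.2.0-py3-none-any.whl/ctfatsegment2/ctfat_segment.py | smoothLeftBorder
-- ===== SOURCE A (Python) =====
-- import copy
--
-- def smoothSideBorder(border):
--     rows = []
--     row = []
--     for i in range(0, len(border)-1):
--         if border[i][0] > border[i+1][0] - 8 and border[i][0] < border[i+1][0] + 8:
--             row.append(border[i])
--             if i == len(border)-2:
--                 row.append(border[i+1])
--                 c = copy.deepcopy(row)
--                 rows.append(c)
--         else:
--             row.append(border[i])
--             c = copy.deepcopy(row)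
--             rows.append(c)
--             row.clear()
--
--     #serie = max(rows, key=len)
--
--     smoothedBorder = []
--     for row in rows:
--         if len(row) > 4:
--             for point in row:
--                 smoothedBorder.append(point)
--
--     return smoothedBorder
--
-- def smoothLeftBorder(borderLeft):
--     borderLeft2 = []
--     if borderLeft[0][0] < borderLeft[1][0] + 1 and borderLeft[0][0] > borderLeft[1][0] - 8:
--         borderLeft2.append(borderLeft[0])
--
--     for i in range(1, len(borderLeft)-1):
--         if borderLeft[i][0] > borderLeft[i-1][0] + 1 and borderLeft[i][0] > borderLeft[i+1][0] + 1:
--             continue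
--         if borderLeft[i][0] < borderLeft[i-1][0] - 1 and borderLeft[i][0] < borderLeft[i+1][0] - 1:
--             continue
--         borderLeft2.append(borderLeft[i])
--
--     if borderLeft[len(borderLeft)-1][0] > borderLeft[len(borderLeft)-2][0] - 8 and borderLeft[len(borderLeft)-1][0] < borderLeft[len(borderLeft)-2][0] + 1:
--         borderLeft2.append(borderLeft[len(borderLeft)-1])
--
--     return smoothSideBorder(borderLeft2)
-- ===== SOURCE B (Python) =====
-- def smoothLeftBorder(borderLeft):
--     # stage 1: point filtering, written over zipped triples instead of index arithmetic
--     first, second = borderLeft[0], borderLeft[1]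
--     prelast, last = borderLeft[-2], borderLeft[-1]
--     pts = [first] if second[0] - 8 < first[0] <= second[0] else []
--     pts += [c for p, c, n in zip(borderLeft, borderLeft[1:], borderLeft[2:])
--             if not (c[0] > p[0] + 1 and c[0] > n[0] + 1)
--             and not (c[0] < p[0] - 1 and c[0] < n[0] - 1)]
--     if prelast[0] - 8 < last[0] <= prelast[0]:
--         pts.append(last)
--
--     # stage 2: peel maximal runs (consecutive x within 8) off the front,
--     # keeping each run longer than 4; a lone trailing point forms no run
--     out = []
--     while len(pts) >= 2:
--         j = 0
--         while j + 1 < len(pts) and abs(pts[j][0] - pts[j + 1][0]) < 8: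
--             j += 1
--         run = pts[:j + 1] if j + 1 < len(pts) else pts
--         if len(run) > 4:
--             out += run
--         pts = pts[j + 1:]
--     return out
-- ===== Notes on version B (the rewrite author's own statement) =====
-- stated objective: alternative
-- what changed: B filters the border points with a comprehension over zipped (prev, cur, next) triples instead of an index loop, and replaces A's two-pass run collection (build a list-of-lists of runs with per-run deepcopy, then re-scan it) by a loop that peels each maximal run (consecutive x within 8) off the front and appends it to the output directly when it is longer than 4.
import Mathlib
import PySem

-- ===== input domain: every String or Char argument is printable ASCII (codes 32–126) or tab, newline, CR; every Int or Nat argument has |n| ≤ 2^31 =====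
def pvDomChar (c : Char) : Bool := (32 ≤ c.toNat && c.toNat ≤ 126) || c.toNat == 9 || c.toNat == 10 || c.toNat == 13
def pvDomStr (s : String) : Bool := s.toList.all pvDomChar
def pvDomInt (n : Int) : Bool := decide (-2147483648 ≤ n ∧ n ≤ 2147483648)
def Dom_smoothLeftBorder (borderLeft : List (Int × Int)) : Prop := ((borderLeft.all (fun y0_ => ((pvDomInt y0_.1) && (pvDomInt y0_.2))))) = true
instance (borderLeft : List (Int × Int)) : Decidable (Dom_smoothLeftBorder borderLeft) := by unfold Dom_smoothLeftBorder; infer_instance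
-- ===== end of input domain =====

-- B filters points via a zipped-triples comprehension and replaces A's rows/deepcopy run collection by
-- peeling maximal runs off the front; objective: alternative decomposition (return value only; no mutation).


-- ===== PORT A =====
-- xs[i] (indices are in range on every admitted input; pyGetD is exact there)
def pvGet (b : List (Int × Int)) (i : Int) : Int × Int := PySem.List.pyGetD b i (0, 0)

-- loop body of smoothSideBorder: state = (rows, row)
def pvStepA (b : List (Int × Int)) (s : List (List (Int × Int)) × List (Int × Int)) (i : Int) :
    List (List (Int × Int)) × List (Int × Int) :=
  if (pvGet b i).1 > (pvGet b (i+1)).1 - 8 ∧ (pvGet b i).1 < (pvGet b (i+1)).1 + 8 then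
    if i = (b.length : Int) - 2 then
      (s.1 ++ [s.2 ++ [pvGet b i, pvGet b (i+1)]], s.2 ++ [pvGet b i, pvGet b (i+1)])
    else (s.1, s.2 ++ [pvGet b i])
  else (s.1 ++ [s.2 ++ [pvGet b i]], [])

-- second loop of smoothSideBorder: keep rows longer than 4, appending point by point
def pvFlush (rows : List (List (Int × Int))) : List (Int × Int) :=
  rows.foldl (fun acc row => if row.length > 4 then row.foldl (fun a p => a ++ [p]) acc else acc) []

def smoothSideBorderA (border : List (Int × Int)) : List (Int × Int) :=
  pvFlush ((PySem.List.pyRange 0 ((border.length : Int) - 1) 1).foldl (pvStepA border) ([], [])).1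

def smoothLeftBorder (borderLeft : List (Int × Int)) : List (Int × Int) :=
  let n : Int := borderLeft.length
  let b0 := if (pvGet borderLeft 0).1 < (pvGet borderLeft 1).1 + 1 ∧ (pvGet borderLeft 0).1 > (pvGet borderLeft 1).1 - 8
            then [pvGet borderLeft 0] else []
  let b1 := (PySem.List.pyRange 1 (n-1) 1).foldl (fun acc i =>
      if (pvGet borderLeft i).1 > (pvGet borderLeft (i-1)).1 + 1 ∧ (pvGet borderLeft i).1 > (pvGet borderLeft (i+1)).1 + 1 then acc
      else if (pvGet borderLeft i).1 < (pvGet borderLeft (i-1)).1 - 1 ∧ (pvGet borderLeft i).1 < (pvGet borderLeft (i+1)).1 - 1 then acc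
      else acc ++ [pvGet borderLeft i]) b0
  let b2 := if (pvGet borderLeft (n-1)).1 > (pvGet borderLeft (n-2)).1 - 8 ∧ (pvGet borderLeft (n-1)).1 < (pvGet borderLeft (n-2)).1 + 1
            then b1 ++ [pvGet borderLeft (n-1)] else b1
  smoothSideBorderA b2

-- ===== PORT B =====
-- keep-test for a middle point c between neighbours p and n (the negations of A's two 'continue's)
def pvKeepMid (p c n : Int × Int) : Bool :=
  !(c.1 > p.1 + 1 && c.1 > n.1 + 1) && !(c.1 < p.1 - 1 && c.1 < n.1 - 1)

-- final value of the inner 'while' counter j: length of the maximal initial chain of small gaps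
def pvRunLen : List (Int × Int) → Nat
  | p :: q :: rest => if |p.1 - q.1| < 8 then pvRunLen (q :: rest) + 1 else 0
  | _ => 0

-- the outer 'while len(pts) >= 2' loop: peel a maximal run, keep it if longer than 4
-- (pts[:j+1] and pts[j+1:] with the nonnegative index j+1 are take/drop: PySem.List.slice_natCast)
def pvPeel (pts : List (Int × Int)) : List (Int × Int) :=
  if h : 2 ≤ pts.length then
    let j := pvRunLen pts
    let run := if j + 1 < pts.length then pts.take (j + 1) else pts
    (if 4 < run.length then run else []) ++ pvPeel (pts.drop (j + 1))
  else []
termination_by pts.length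
decreasing_by simp; omega

def smoothLeftBorder_alt (borderLeft : List (Int × Int)) : List (Int × Int) :=
  let first := PySem.List.pyGetD borderLeft 0 (0, 0)
  let second := PySem.List.pyGetD borderLeft 1 (0, 0)
  let prelast := PySem.List.pyGetD borderLeft (-2) (0, 0)
  let last := PySem.List.pyGetD borderLeft (-1) (0, 0)
  let pts0 := if second.1 - 8 < first.1 ∧ first.1 ≤ second.1 then [first] else []
  -- zip(borderLeft, borderLeft[1:], borderLeft[2:]) as nested pairs; the comprehension is filter+map
  let mids := ((borderLeft.zip ((borderLeft.drop 1).zip (borderLeft.drop 2))).filter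
                (fun t => pvKeepMid t.1 t.2.1 t.2.2)).map (fun t => t.2.1)
  let pts := if prelast.1 - 8 < last.1 ∧ last.1 ≤ prelast.1
             then pts0 ++ mids ++ [last] else pts0 ++ mids
  pvPeel pts

-- ===== PRECONDITION & SPEC =====
-- A raises IndexError when len(borderLeft) < 2 (it reads borderLeft[0], [1], [-1], [-2]); Pre_ excludes exactly those.
def Pre_smoothLeftBorder (borderLeft : List (Int × Int)) : Prop := 2 ≤ borderLeft.length
instance (borderLeft : List (Int × Int)) : Decidable (Pre_smoothLeftBorder borderLeft) := by unfold Pre_smoothLeftBorder; infer_instance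
def pvWitness_smoothLeftBorder : (List (Int × Int)) := [(0, 0), (1, 1)]

def Spec_smoothLeftBorder (borderLeft : List (Int × Int)) (out : List (Int × Int)) : Prop := out = smoothLeftBorder_alt borderLeft
instance (borderLeft : List (Int × Int)) (out : List (Int × Int)) : Decidable (Spec_smoothLeftBorder borderLeft out) := by unfold Spec_smoothLeftBorder; infer_instance

-- ===== CLAIM (what is proved, stated in full; the proofs are below) =====
def Claim_equal_smoothLeftBorder : Prop := ∀ (borderLeft : List (Int × Int)), Dom_smoothLeftBorder borderLeft → Pre_smoothLeftBorder borderLeft → Spec_smoothLeftBorder borderLeft (smoothLeftBorder borderLeft)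

-- ===== LEMMAS AND PROOFS =====

-- A's middle loop, fused: folding from index j+1 appends exactly B's filtered middle points of the suffix
lemma mid_loop (b : List (Int × Int)) : ∀ (m j : Nat) (acc : List (Int × Int)),
    b.length ≤ j + 2 + m →
    (PySem.List.pyRange ((j : Int) + 1) ((b.length : Int) - 1) 1).foldl (fun acc i =>
      if (pvGet b i).1 > (pvGet b (i-1)).1 + 1 ∧ (pvGet b i).1 > (pvGet b (i+1)).1 + 1 then acc
      else if (pvGet b i).1 < (pvGet b (i-1)).1 - 1 ∧ (pvGet b i).1 < (pvGet b (i+1)).1 - 1 then acc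
      else acc ++ [pvGet b i]) acc
    = acc ++ (((b.drop j).zip ((b.drop (j+1)).zip (b.drop (j+2)))).filter
                (fun t => pvKeepMid t.1 t.2.1 t.2.2)).map (fun t => t.2.1) := by
  intro m
  induction m with
  | zero =>
    intro j acc h
    rw [PySem.List.pyRange_one_eq_nil (by omega)]
    have hz : b.drop (j+2) = [] := List.drop_eq_nil_of_le (by omega)
    simp [hz]
  | succ m ih =>
    intro j acc h
    by_cases hle : b.length ≤ j + 2 + m
    · exact ih j acc hle
    · have hlen : j + 2 < b.length := by omega
      rw [PySem.List.pyRange_one_cons (by omega : (j : Int) + 1 < (b.length : Int) - 1), List.foldl_cons]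
      have d0 : b.drop j = b[j] :: b.drop (j+1) := List.drop_eq_getElem_cons (by omega)
      have d1 : b.drop (j+1) = b[j+1] :: b.drop (j+2) := List.drop_eq_getElem_cons (by omega)
      have d2 : b.drop (j+2) = b[j+2] :: b.drop (j+3) := List.drop_eq_getElem_cons (by omega)
      have g0 : pvGet b ((j : Int) + 1 - 1) = b[j] := by
        rw [show (j : Int) + 1 - 1 = ((j : Nat) : Int) from by omega, pvGet,
            PySem.List.pyGetD_natCast, List.getD_eq_getElem _ _ (by omega)]
      have g1 : pvGet b ((j : Int) + 1) = b[j+1] := by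
        rw [show (j : Int) + 1 = ((j + 1 : Nat) : Int) from by omega, pvGet,
            PySem.List.pyGetD_natCast, List.getD_eq_getElem _ _ (by omega)]
      have g2 : pvGet b ((j : Int) + 1 + 1) = b[j+2] := by
        rw [show (j : Int) + 1 + 1 = ((j + 2 : Nat) : Int) from by omega, pvGet,
            PySem.List.pyGetD_natCast, List.getD_eq_getElem _ _ (by omega)]
      have hshift : ∀ acc' : List (Int × Int),
          (PySem.List.pyRange ((j : Int) + 1 + 1) ((b.length : Int) - 1) 1).foldl (fun acc i =>
            if (pvGet b i).1 > (pvGet b (i-1)).1 + 1 ∧ (pvGet b i).1 > (pvGet b (i+1)).1 + 1 then acc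
            else if (pvGet b i).1 < (pvGet b (i-1)).1 - 1 ∧ (pvGet b i).1 < (pvGet b (i+1)).1 - 1 then acc
            else acc ++ [pvGet b i]) acc'
          = acc' ++ (((b.drop (j+1)).zip ((b.drop (j+2)).zip (b.drop (j+3)))).filter
                (fun t => pvKeepMid t.1 t.2.1 t.2.2)).map (fun t => t.2.1) := by
        intro acc'
        have hiv := ih (j+1) acc' (by omega)
        rw [show ((j + 1 : Nat) : Int) + 1 = (j : Int) + 1 + 1 from by omega] at hiv
        rw [show j + 1 + 1 = j + 2 from rfl, show j + 1 + 2 = j + 3 from rfl] at hiv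
        exact hiv
      rw [d0, d1, d2, List.zip_cons_cons, List.zip_cons_cons, List.filter_cons]
      simp only [g0, g1, g2]
      rw [← d2, ← d1]
      by_cases hc1 : b[j+1].1 > b[j].1 + 1 ∧ b[j+1].1 > b[j+2].1 + 1
      · rw [if_pos hc1]
        have hk : pvKeepMid b[j] b[j+1] b[j+2] = false := by
          simp only [pvKeepMid, Bool.and_eq_false_iff, Bool.not_eq_false']
          left
          rw [decide_eq_true hc1.1, decide_eq_true hc1.2]
          rfl
        rw [hk]
        simp only [Bool.false_eq_true, if_false]
        exact hshift acc
      · rw [if_neg hc1]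
        by_cases hc2 : b[j+1].1 < b[j].1 - 1 ∧ b[j+1].1 < b[j+2].1 - 1
        · rw [if_pos hc2]
          have hk : pvKeepMid b[j] b[j+1] b[j+2] = false := by
            simp only [pvKeepMid, Bool.and_eq_false_iff, Bool.not_eq_false']
            right
            rw [decide_eq_true hc2.1, decide_eq_true hc2.2]
            rfl
          rw [hk]
          simp only [Bool.false_eq_true, if_false]
          exact hshift acc
        · rw [if_neg hc2]
          have hk : pvKeepMid b[j] b[j+1] b[j+2] = true := by
            simp only [pvKeepMid, Bool.and_eq_true, Bool.not_eq_true']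
            constructor
            · rw [Bool.and_eq_false_iff]
              rcases not_and_or.mp hc1 with h1 | h2
              · left; simpa using h1
              · right; simpa using h2
            · rw [Bool.and_eq_false_iff]
              rcases not_and_or.mp hc2 with h1 | h2
              · left; simpa using h1
              · right; simpa using h2
          rw [hk, if_pos rfl, List.map_cons, hshift (acc ++ [b[j+1]]), List.append_assoc]
          rfl

-- A's first loop over the border produces A's rows list as pvRows (defined below in spirit):
def pvRows : List (Int × Int) → List (Int × Int) → List (List (Int × Int))
  | p :: q :: rest, row =>
    if |p.1 - q.1| < 8 then
      (match rest with
       | [] => [row ++ [p, q]]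
       | _ :: _ => pvRows (q :: rest) (row ++ [p]))
    else (row ++ [p]) :: pvRows (q :: rest) []
  | _, _ => []

lemma pvRows_short (l : List (Int × Int)) (row : List (Int × Int)) (h : l.length ≤ 1) :
    pvRows l row = [] := by
  match l with
  | [] => rfl
  | [a] => rfl
  | a :: b :: t => simp at h

lemma pvRows_pair_small (p q : Int × Int) (row : List (Int × Int)) (h : |p.1 - q.1| < 8) :
    pvRows [p, q] row = [row ++ [p, q]] := by
  simp [pvRows, h]

lemma pvRows_cons_small (p q : Int × Int) (rest row : List (Int × Int)) (h : |p.1 - q.1| < 8)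
    (hr : rest ≠ []) : pvRows (p :: q :: rest) row = pvRows (q :: rest) (row ++ [p]) := by
  match rest with
  | [] => exact absurd rfl hr
  | r :: rs => simp [pvRows, h]

lemma pvRows_cons_big (p q : Int × Int) (rest row : List (Int × Int)) (h : ¬ |p.1 - q.1| < 8) :
    pvRows (p :: q :: rest) row = (row ++ [p]) :: pvRows (q :: rest) [] := by
  simp [pvRows, h]

lemma foldA_rows (b : List (Int × Int)) : ∀ (m j : Nat) (rows : List (List (Int × Int))) (row : List (Int × Int)),
    b.length ≤ j + 1 + m →
    ((PySem.List.pyRange (j : Int) ((b.length : Int) - 1) 1).foldl (pvStepA b) (rows, row)).1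
    = rows ++ pvRows (b.drop j) row := by
  intro m
  induction m with
  | zero =>
    intro j rows row h
    rw [PySem.List.pyRange_one_eq_nil (by omega), List.foldl_nil]
    rw [pvRows_short _ _ (by simp; omega)]
    simp
  | succ m ih =>
    intro j rows row h
    by_cases hle : b.length ≤ j + 1 + m
    · exact ih j rows row hle
    · have hlen : j + 1 < b.length := by omega
      rw [PySem.List.pyRange_one_cons (by omega : (j : Int) < (b.length : Int) - 1), List.foldl_cons]
      have d0 : b.drop j = b[j] :: b.drop (j+1) := List.drop_eq_getElem_cons (by omega)
      have d1 : b.drop (j+1) = b[j+1] :: b.drop (j+2) := List.drop_eq_getElem_cons (by omega)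
      have g0 : pvGet b (j : Int) = b[j] := by
        rw [pvGet, PySem.List.pyGetD_natCast, List.getD_eq_getElem _ _ (by omega)]
      have g1 : pvGet b ((j : Int) + 1) = b[j+1] := by
        rw [show (j : Int) + 1 = ((j + 1 : Nat) : Int) from by omega, pvGet,
            PySem.List.pyGetD_natCast, List.getD_eq_getElem _ _ (by omega)]
      have hshiftA : ∀ (rows' : List (List (Int × Int))) (row' : List (Int × Int)),
          ((PySem.List.pyRange ((j : Int) + 1) ((b.length : Int) - 1) 1).foldl (pvStepA b) (rows', row')).1
          = rows' ++ pvRows (b.drop (j+1)) row' := by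
        intro rows' row'
        have hiv := ih (j+1) rows' row' (by omega)
        rw [show ((j + 1 : Nat) : Int) = (j : Int) + 1 from by omega] at hiv
        exact hiv
      simp only [pvStepA, g0, g1]
      by_cases hc : b[j].1 > b[j+1].1 - 8 ∧ b[j].1 < b[j+1].1 + 8
      · have habs : |b[j].1 - b[j+1].1| < 8 := abs_sub_lt_iff.mpr ⟨by omega, by omega⟩
        rw [if_pos hc]
        by_cases hlast : (j : Int) = (b.length : Int) - 2
        · rw [if_pos hlast]
          rw [PySem.List.pyRange_one_eq_nil (by omega), List.foldl_nil]
          have hrest : b.drop (j+2) = [] := List.drop_eq_nil_of_le (by omega)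
          rw [d0, d1, hrest, pvRows_pair_small _ _ _ habs]
        · rw [if_neg hlast]
          rw [hshiftA rows (row ++ [b[j]])]
          have hne : b.drop (j+2) ≠ [] := by
            have : (b.drop (j+2)).length = b.length - (j+2) := by simp
            intro hnil
            rw [hnil] at this
            simp at this
            omega
          rw [d0, d1, pvRows_cons_small _ _ _ _ habs hne, ← d1]
      · have habs : ¬ |b[j].1 - b[j+1].1| < 8 := by
          rw [abs_sub_lt_iff]
          omega
        rw [if_neg hc]
        rw [hshiftA (rows ++ [row ++ [b[j]]]) []]
        rw [d0, d1, pvRows_cons_big _ _ _ _ habs, ← d1, List.append_assoc]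
        rfl

lemma flush_eq (rows : List (List (Int × Int))) : ∀ acc : List (Int × Int),
    rows.foldl (fun acc row => if row.length > 4 then row.foldl (fun a p => a ++ [p]) acc else acc) acc
    = acc ++ (rows.filter (fun r => decide (r.length > 4))).flatten := by
  induction rows with
  | nil => intro acc; simp
  | cons r rs ih =>
    intro acc
    simp only [List.foldl_cons, List.filter_cons]
    by_cases h : r.length > 4
    · rw [if_pos h, PySem.List.foldl_append_singleton, ih]
      simp [h]
    · rw [if_neg h, ih]
      simp [h]

lemma rows_peel (pts : List (Int × Int)) : ∀ row : List (Int × Int), 2 ≤ pts.length →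
    pvRows pts row = if pvRunLen pts + 1 < pts.length
      then (row ++ pts.take (pvRunLen pts + 1)) :: pvRows (pts.drop (pvRunLen pts + 1)) []
      else [row ++ pts] := by
  induction pts with
  | nil => intro row h; simp at h
  | cons p t ih =>
    intro row h
    match t with
    | [] => simp at h
    | q :: rest =>
      by_cases hg : |p.1 - q.1| < 8
      · match rest with
        | [] => simp [pvRows, pvRunLen, hg]
        | r :: rs =>
          have h2 : 2 ≤ (q :: r :: rs).length := by simp
          have hiv := ih (row ++ [p]) h2
          have hrw : pvRows (p :: q :: r :: rs) row = pvRows (q :: r :: rs) (row ++ [p]) := by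
            simp [pvRows, hg]
          have hrl : pvRunLen (p :: q :: r :: rs) = pvRunLen (q :: r :: rs) + 1 := by
            simp [pvRunLen, hg]
          rw [hrw, hiv, hrl]
          by_cases hlt : pvRunLen (q :: r :: rs) + 1 < (q :: r :: rs).length
          · rw [if_pos hlt, if_pos (by simp at hlt ⊢; omega)]
            simp [List.take_succ_cons, List.drop_succ_cons]
          · rw [if_neg hlt, if_neg (by simp at hlt ⊢; omega)]
            simp
      · have hrl : pvRunLen (p :: q :: rest) = 0 := by simp [pvRunLen, hg]
        rw [hrl]
        rw [if_pos (by simp)]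
        simp [pvRows, hg]

lemma peel_aux : ∀ (n : Nat) (pts : List (Int × Int)), pts.length ≤ n →
    pvPeel pts = ((pvRows pts []).filter (fun r => decide (r.length > 4))).flatten := by
  intro n
  induction n with
  | zero =>
    intro pts h
    have : pts = [] := List.eq_nil_of_length_eq_zero (by omega)
    subst this
    rw [pvPeel]
    simp [pvRows]
  | succ n ih =>
    intro pts h
    by_cases h2 : 2 ≤ pts.length
    · rw [pvPeel, dif_pos h2]
      simp only []
      rw [rows_peel pts [] h2]
      by_cases hlt : pvRunLen pts + 1 < pts.length
      · rw [if_pos hlt, if_pos hlt]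
        rw [ih (pts.drop (pvRunLen pts + 1)) (by simp; omega)]
        simp only [List.filter_cons, List.nil_append]
        have ht : (pts.take (pvRunLen pts + 1)).length = pvRunLen pts + 1 := by
          simp; omega
        by_cases h4 : 4 < (pts.take (pvRunLen pts + 1)).length
        · rw [if_pos h4, decide_eq_true (by omega : 4 < (pts.take (pvRunLen pts + 1)).length)]
          simp
        · rw [if_neg h4, decide_eq_false (by omega : ¬ 4 < (pts.take (pvRunLen pts + 1)).length)]
          simp
      · rw [if_neg hlt, if_neg hlt]
        have hd : pts.drop (pvRunLen pts + 1) = [] := List.drop_eq_nil_of_le (by omega)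
        have hnil : pvPeel ([] : List (Int × Int)) = [] := by rw [pvPeel]; simp
        rw [hd, hnil, List.append_nil]
        simp only [List.filter_cons, List.filter_nil, List.nil_append]
        by_cases h4 : 4 < pts.length
        · rw [if_pos h4, decide_eq_true (by omega : pts.length > 4)]
          simp
        · rw [if_neg h4, decide_eq_false (by omega : ¬ pts.length > 4)]
          simp
    · rw [pvPeel, dif_neg h2]
      rw [pvRows_short pts [] (by omega)]
      simp

lemma peel_eq (pts : List (Int × Int)) :
    pvPeel pts = ((pvRows pts []).filter (fun r => decide (r.length > 4))).flatten :=
  peel_aux pts.length pts le_rfl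

lemma side_eq (pts : List (Int × Int)) : smoothSideBorderA pts = pvPeel pts := by
  rw [smoothSideBorderA]
  have hA := foldA_rows pts pts.length 0 [] [] (by omega)
  rw [show ((0 : Nat) : Int) = 0 from rfl] at hA
  rw [hA, List.drop_zero, List.nil_append, pvFlush, flush_eq, peel_eq]
  simp

-- ===== VERDICT (by name: the statement is the Claim_ definition above) =====
theorem smoothLeftBorder_spec : Claim_equal_smoothLeftBorder := by
  intro b _ hpre
  have h2 : 2 ≤ b.length := hpre
  unfold Spec_smoothLeftBorder
  simp only [smoothLeftBorder, smoothLeftBorder_alt, pvGet]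
  rw [side_eq]
  congr 1
  have hto1 : ((b.length : Int) - 1).toNat = b.length - 1 := by omega
  have hto2 : ((b.length : Int) - 2).toNat = b.length - 2 := by omega
  have e1 : PySem.List.pyGetD b (-1) ((0 : Int), (0 : Int)) = PySem.List.pyGetD b ((b.length : Int) - 1) ((0 : Int), (0 : Int)) := by
    rw [PySem.List.pyGetD_neg_ofNat b 1 (0, 0) (by omega) (by omega),
        PySem.List.pyGetD_eq_getElem b (0, 0) (by omega) (by omega)]
    simp [hto1]
  have e2 : PySem.List.pyGetD b (-2) ((0 : Int), (0 : Int)) = PySem.List.pyGetD b ((b.length : Int) - 2) ((0 : Int), (0 : Int)) := by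
    rw [PySem.List.pyGetD_neg_ofNat b 2 (0, 0) (by omega) (by omega),
        PySem.List.pyGetD_eq_getElem b (0, 0) (by omega) (by omega)]
    simp [hto2]
  rw [e1, e2]
  have hmid := mid_loop b b.length 0
    (if (PySem.List.pyGetD b 0 ((0 : Int), (0 : Int))).1 < (PySem.List.pyGetD b 1 ((0 : Int), (0 : Int))).1 + 1 ∧
        (PySem.List.pyGetD b 0 ((0 : Int), (0 : Int))).1 > (PySem.List.pyGetD b 1 ((0 : Int), (0 : Int))).1 - 8
     then [PySem.List.pyGetD b 0 ((0 : Int), (0 : Int))] else []) (by omega)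
  simp only [pvGet] at hmid
  rw [show ((0 : Nat) : Int) + 1 = (1 : Int) from by norm_num] at hmid
  rw [List.drop_zero] at hmid
  rw [hmid]
  have hb0 : (if (PySem.List.pyGetD b 0 ((0 : Int), (0 : Int))).1 < (PySem.List.pyGetD b 1 ((0 : Int), (0 : Int))).1 + 1 ∧
        (PySem.List.pyGetD b 0 ((0 : Int), (0 : Int))).1 > (PySem.List.pyGetD b 1 ((0 : Int), (0 : Int))).1 - 8
     then [PySem.List.pyGetD b 0 ((0 : Int), (0 : Int))] else [])
     = (if (PySem.List.pyGetD b 1 ((0 : Int), (0 : Int))).1 - 8 < (PySem.List.pyGetD b 0 ((0 : Int), (0 : Int))).1 ∧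
          (PySem.List.pyGetD b 0 ((0 : Int), (0 : Int))).1 ≤ (PySem.List.pyGetD b 1 ((0 : Int), (0 : Int))).1
        then [PySem.List.pyGetD b 0 ((0 : Int), (0 : Int))] else []) := by
    by_cases h0 : (PySem.List.pyGetD b 0 ((0 : Int), (0 : Int))).1 < (PySem.List.pyGetD b 1 ((0 : Int), (0 : Int))).1 + 1 ∧
        (PySem.List.pyGetD b 0 ((0 : Int), (0 : Int))).1 > (PySem.List.pyGetD b 1 ((0 : Int), (0 : Int))).1 - 8
    · rw [if_pos h0, if_pos ⟨by omega, by omega⟩]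
    · rw [if_neg h0, if_neg (by rintro ⟨hx, hy⟩; exact h0 ⟨by omega, by omega⟩)]
  rw [hb0]
  by_cases hA : (PySem.List.pyGetD b ((b.length : Int) - 1) ((0 : Int), (0 : Int))).1 >
      (PySem.List.pyGetD b ((b.length : Int) - 2) ((0 : Int), (0 : Int))).1 - 8 ∧
      (PySem.List.pyGetD b ((b.length : Int) - 1) ((0 : Int), (0 : Int))).1 <
      (PySem.List.pyGetD b ((b.length : Int) - 2) ((0 : Int), (0 : Int))).1 + 1
  · have hB : (PySem.List.pyGetD b ((b.length : Int) - 2) ((0 : Int), (0 : Int))).1 - 8 <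
        (PySem.List.pyGetD b ((b.length : Int) - 1) ((0 : Int), (0 : Int))).1 ∧
        (PySem.List.pyGetD b ((b.length : Int) - 1) ((0 : Int), (0 : Int))).1 ≤
        (PySem.List.pyGetD b ((b.length : Int) - 2) ((0 : Int), (0 : Int))).1 := ⟨by omega, by omega⟩
    rw [if_pos hA, if_pos hB, List.append_assoc]
  · have hB : ¬ ((PySem.List.pyGetD b ((b.length : Int) - 2) ((0 : Int), (0 : Int))).1 - 8 <
        (PySem.List.pyGetD b ((b.length : Int) - 1) ((0 : Int), (0 : Int))).1 ∧
        (PySem.List.pyGetD b ((b.length : Int) - 1) ((0 : Int), (0 : Int))).1 ≤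
        (PySem.List.pyGetD b ((b.length : Int) - 2) ((0 : Int), (0 : Int))).1) := by
      rintro ⟨hx, hy⟩
      exact hA ⟨by omega, by omega⟩
    rw [if_neg hA, if_neg hB]
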